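-- pv_equiv track=rewrite | github.com/xiaoqing8/ByteDance | bytedance.py | famousPlayer
-- ===== SOURCE A (Python) =====
-- def famousPlayer(num, gx_list):
--     # 抖音工程师想要找到抖音中的红人，假设用户数为N,有M个关注关系对(A, B), 表示A关注了B.
--     # 关注关系具有传递性，A->B, B->C则可推出A->C。如果一个用户被所有N个用户直接或间接关注，
--     # 那么我们认为这个用户就是抖音红人，求抖音红人的总数
--     import collections
--     gx_dict = collections.defaultdict(set)  # key表示用户，value为list，表示谁关注了他
--     for i, x in enumerate(gx_list):
--         if i % 2 != 0:  # 奇数表示拿到的是关注的对象 奇数前面的偶数表示关注此对象的人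
--             gx_dict[x].add(x)
--             gx_dict[x].add(gx_list[i - 1])  # key是被关注的，value是玩家
--
--     for i in range(int(num)):  # 遍历所有的用户。需要多次检测，因为有间接的关注关系
--         for star, user in gx_dict.items():  # star 表示被关注的人， user表示关注者
--             add_people = set()
--             for x in user:
--                 if x in gx_dict:
--                     add_people |= gx_dict[x]  # 取并集
--             gx_dict[star] |= add_people
--
--     star_num = 0
--     for star, user in gx_dict.items():
--         if len(user) == int(num):
--             star_num += 1
--     return star_num
-- ===== SOURCE B (Python) =====
-- def famousPlayer(num, gx_list):
--     # Per-star BFS over the reverse (follower) graph instead of num global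
--     # propagation rounds: count stars whose set of (transitive) followers,
--     # themselves included, has exactly num elements.
--     foll = {}            # star -> {star} | {direct followers of star}
--     order = []           # stars in first-appearance order
--     for i in range(1, len(gx_list), 2):
--         b = gx_list[i]
--         a = gx_list[i - 1]
--         if b not in foll:
--             foll[b] = set()
--             order.append(b)
--         foll[b].add(b)
--         foll[b].add(a)
--     count = 0
--     for s in order:
--         reach = set(foll[s])
--         frontier = foll[s]
--         while frontier:
--             nxt = set()
--             for v in frontier:
--                 for u in foll.get(v, ()):
--                     if u not in reach:
--                         nxt.add(u)
--             reach |= nxt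
--             frontier = nxt
--         if len(reach) == int(num):
--             count += 1
--     return count
-- ===== Notes on version B (the rewrite author's own statement) =====
-- stated objective: faster
-- what changed: B replaces A's int(num) global propagation rounds over the whole follower dict (repeated set unions of evolving follower sets) by a single frontier-BFS closure per star over the direct-follower graph; a proved cardinality argument shows the 'size == num' test gives identical counts.
import Mathlib
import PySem

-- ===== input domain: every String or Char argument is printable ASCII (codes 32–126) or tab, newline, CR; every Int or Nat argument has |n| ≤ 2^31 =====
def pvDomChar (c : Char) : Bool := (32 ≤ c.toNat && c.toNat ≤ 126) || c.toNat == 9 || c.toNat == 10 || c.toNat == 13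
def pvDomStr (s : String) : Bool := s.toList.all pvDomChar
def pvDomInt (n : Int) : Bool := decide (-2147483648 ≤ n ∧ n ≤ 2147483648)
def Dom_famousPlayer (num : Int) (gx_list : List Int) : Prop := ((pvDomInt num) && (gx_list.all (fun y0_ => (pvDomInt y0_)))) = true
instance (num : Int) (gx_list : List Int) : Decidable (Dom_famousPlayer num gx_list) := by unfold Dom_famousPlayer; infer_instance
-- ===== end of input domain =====

-- B replaces A's num global propagation rounds over the whole dict (O(num·N·E)) by one
-- BFS-style frontier closure per star; proved to return A's exact value on every input.

-- ===== PORT A =====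
-- literal transliteration of A: defaultdict build over enumerate, then num rounds of
-- in-place set propagation over the dict, then count values of size num.
def famousPlayer (num : Int) (gx_list : List Int) : Int :=
  let gx_dict : PySem.Dict Int (PySem.Set Int) :=
    (PySem.List.enumerate gx_list).foldl (fun d p =>
      if PySem.Int.mod p.1 2 ≠ 0 then
        d.insert p.2 (((d.getD p.2 PySem.Set.empty).add p.2).add
          (PySem.List.pyGetD gx_list (p.1 - 1) 0))
      else d) PySem.Dict.empty
  let gx_dict2 : PySem.Dict Int (PySem.Set Int) :=
    (PySem.List.pyRange 0 num).foldl (fun d _ =>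
      d.keys.foldl (fun d star =>
        let user := d.getD star PySem.Set.empty
        let add_people := user.foldl (fun acc x =>
          if d.contains x then acc.union (d.getD x PySem.Set.empty) else acc)
          PySem.Set.empty
        d.insert star (user.union add_people)) d) gx_dict
  gx_dict2.items.foldl (fun star_num p =>
    if PySem.Set.len p.2 = num then star_num + 1 else star_num) 0

-- ===== PORT B =====
-- B's while-loop: frontier BFS closure; the Nat fuel is only a totality guard
-- (proved never to run out for the calls famousPlayer_alt makes).
def pvBfs (foll : PySem.Dict Int (PySem.Set Int)) :
    Nat → PySem.Set Int → PySem.Set Int → PySem.Set Int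
  | 0, reach, _ => reach
  | fuel + 1, reach, frontier =>
    if frontier.isEmpty then reach
    else
      let nxt := frontier.foldl (fun nxt v =>
        (foll.getD v PySem.Set.empty).foldl (fun nxt u =>
          if reach.contains u then nxt else nxt.add u) nxt) PySem.Set.empty
      pvBfs foll fuel (reach.union nxt) nxt

-- B's build loop: foll dict and the `order` list of stars in first-appearance order.
def pvBuildB (gx_list : List Int) : PySem.Dict Int (PySem.Set Int) × List Int :=
  (PySem.List.pyRange 1 gx_list.length 2).foldl (fun fo i =>
    let b := PySem.List.pyGetD gx_list i 0
    let a := PySem.List.pyGetD gx_list (i - 1) 0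
    let fo := if fo.1.contains b then fo else (fo.1.insert b PySem.Set.empty, fo.2 ++ [b])
    (fo.1.insert b (((fo.1.getD b PySem.Set.empty).add b).add a), fo.2))
    (PySem.Dict.empty, [])

def famousPlayer_alt (num : Int) (gx_list : List Int) : Int :=
  let fo := pvBuildB gx_list
  fo.2.foldl (fun count s =>
    let seed := fo.1.getD s PySem.Set.empty
    let reach := pvBfs fo.1 (gx_list.length + 2) seed seed
    if PySem.Set.len reach = num then count + 1 else count) 0

-- ===== PRECONDITION & SPEC =====
def Spec_famousPlayer (num : Int) (gx_list : List Int) (out : Int) : Prop := out = famousPlayer_alt num gx_list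
instance (num : Int) (gx_list : List Int) (out : Int) : Decidable (Spec_famousPlayer num gx_list out) := by unfold Spec_famousPlayer; infer_instance

-- ===== CLAIM (what is proved, stated in full; the proofs are below) =====
def Claim_equal_famousPlayer : Prop := ∀ (num : Int) (gx_list : List Int), Dom_famousPlayer num gx_list → Spec_famousPlayer num gx_list (famousPlayer num gx_list)

-- ===== LEMMAS AND PROOFS =====

-- shorthand: the (defaultdict) value of a key
def pvGet (d : PySem.Dict Int (PySem.Set Int)) (k : Int) : PySem.Set Int :=
  d.getD k PySem.Set.empty

-- consecutive (follower, star) pairs of gx_list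
def pvPairs : List Int → List (Int × Int)
  | a :: b :: t => (a, b) :: pvPairs t
  | _ => []

-- one build step, and the reference dict both builds produce
def pvStep (d : PySem.Dict Int (PySem.Set Int)) (p : Int × Int) :
    PySem.Dict Int (PySem.Set Int) :=
  d.insert p.2 (((pvGet d p.2).add p.2).add p.1)

def pvD0 (gx_list : List Int) : PySem.Dict Int (PySem.Set Int) :=
  (pvPairs gx_list).foldl pvStep PySem.Dict.empty

-- x (transitively) reaches into s's follower set
inductive pvRch (d : PySem.Dict Int (PySem.Set Int)) (s : Int) : Int → Prop
  | base {x : Int} : x ∈ pvGet d s → pvRch d s x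
  | step {v x : Int} : pvRch d s v → x ∈ pvGet d v → pvRch d s x

-- one synchronous expansion step and its iterates (proof-side reference chain)
def pvT (d : PySem.Dict Int (PySem.Set Int)) (Y : List Int) : List Int :=
  Y.foldl (fun acc x => PySem.Set.update acc (pvGet d x)) Y

def pvChain (d : PySem.Dict Int (PySem.Set Int)) (s : Int) : Nat → List Int
  | 0 => pvGet d s
  | k + 1 => pvT d (pvChain d s k)

-- A's one propagation round
def pvRound (d : PySem.Dict Int (PySem.Set Int)) : PySem.Dict Int (PySem.Set Int) :=
  d.keys.foldl (fun d star =>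
    let user := d.getD star PySem.Set.empty
    let add_people := user.foldl (fun acc x =>
      if d.contains x then acc.union (d.getD x PySem.Set.empty) else acc)
      PySem.Set.empty
    d.insert star (user.union add_people)) d

-- invariant carried through A's rounds
def pvInv (d0 d' : PySem.Dict Int (PySem.Set Int)) : Prop :=
  d'.keys = d0.keys ∧
  ∀ k, (pvGet d' k).Nodup ∧ pvGet d0 k ⊆ pvGet d' k ∧ ∀ x ∈ pvGet d' k, pvRch d0 k x

def pvMono (d1 d2 : PySem.Dict Int (PySem.Set Int)) : Prop :=
  ∀ k, pvGet d1 k ⊆ pvGet d2 k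

-- ---- generic facts ----

theorem pvT_mem (d : PySem.Dict Int (PySem.Set Int)) (Y : List Int) (a : Int) :
    a ∈ pvT d Y ↔ a ∈ Y ∨ ∃ x ∈ Y, a ∈ pvGet d x := by
  have gen : ∀ (l acc : List Int),
      a ∈ l.foldl (fun acc x => PySem.Set.update acc (pvGet d x)) acc ↔
        a ∈ acc ∨ ∃ x ∈ l, a ∈ pvGet d x := by
    intro l
    induction l with
    | nil => intro acc; simp
    | cons y t ih =>
      intro acc
      rw [List.foldl_cons, ih, PySem.Set.mem_update]
      constructor
      · rintro ((h | h) | h)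
        · exact Or.inl h
        · exact Or.inr ⟨y, by simp, h⟩
        · obtain ⟨x, hx, hax⟩ := h
          exact Or.inr ⟨x, by simp [hx], hax⟩
      · rintro (h | ⟨x, hx, hax⟩)
        · exact Or.inl (Or.inl h)
        · rcases List.mem_cons.1 hx with rfl | hx
          · exact Or.inl (Or.inr hax)
          · exact Or.inr ⟨x, hx, hax⟩
  exact gen Y Y


theorem pvT_nodup (d : PySem.Dict Int (PySem.Set Int)) (Y : List Int) (h : Y.Nodup) :
    (pvT d Y).Nodup := by
  have gen : ∀ (l acc : List Int), acc.Nodup →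
      (l.foldl (fun acc x => PySem.Set.update acc (pvGet d x)) acc).Nodup := by
    intro l
    induction l with
    | nil => intro acc h; simpa using h
    | cons y t ih =>
      intro acc h
      rw [List.foldl_cons]
      exact ih _ (PySem.Set.nodup_update _ _ h)
  exact gen Y Y h


theorem pvT_sub (d : PySem.Dict Int (PySem.Set Int)) (Y : List Int) : Y ⊆ pvT d Y := by
  intro a ha
  exact (pvT_mem d Y a).2 (Or.inl ha)


theorem pvChain_mono (d : PySem.Dict Int (PySem.Set Int)) (s : Int) {j k : Nat}
    (h : j ≤ k) : pvChain d s j ⊆ pvChain d s k := by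
  induction k with
  | zero => cases Nat.le_zero.1 h; exact fun a ha => ha
  | succ k ih =>
    rcases Nat.le_succ_iff_eq_or_le.mp (by omega : j ≤ k + 1) with rfl | hjk
    · exact fun a ha => ha
    · exact fun a ha => pvT_sub d _ (ih hjk ha)


theorem pvChain_nodup (d : PySem.Dict Int (PySem.Set Int)) (s : Int)
    (h : (pvGet d s).Nodup) (k : Nat) : (pvChain d s k).Nodup := by
  induction k with
  | zero => exact h
  | succ k ih => exact pvT_nodup d _ ih


theorem pvChain_rch (d : PySem.Dict Int (PySem.Set Int)) (s : Int) (k : Nat) :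
    ∀ a ∈ pvChain d s k, pvRch d s a := by
  induction k with
  | zero => exact fun a ha => pvRch.base ha
  | succ k ih =>
    intro a ha
    rcases (pvT_mem d _ a).1 ha with h | ⟨x, hx, hax⟩
    · exact ih a h
    · exact pvRch.step (ih x hx) hax


theorem pvRch_trans (d : PySem.Dict Int (PySem.Set Int)) {s v x : Int}
    (h1 : pvRch d s v) (h2 : pvRch d v x) : pvRch d s x := by
  induction h2 with
  | base h => exact pvRch.step h1 h
  | step _ h ih => exact pvRch.step ih h


theorem pvGrowth (d : PySem.Dict Int (PySem.Set Int)) (s : Int) {r : Int} {Y : List Int}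
    (hr : pvRch d s r) (hnin : r ∉ Y) (hseed : pvGet d s ⊆ Y) :
    ∃ w, w ∈ pvT d Y ∧ w ∉ Y := by
  revert hnin
  induction hr with
  | base h => intro hnin; exact absurd (hseed h) hnin
  | @step v x hv hx ih =>
    intro hnin
    by_cases hvY : v ∈ Y
    · exact ⟨x, (pvT_mem d Y x).2 (Or.inr ⟨v, hvY, hx⟩), hnin⟩
    · exact ih hvY


theorem pvSubLen {l1 l2 : List Int} (h : l1 ⊆ l2) (hn : l1.Nodup) :
    l1.length ≤ l2.length := by
  calc l1.length = l1.toFinset.card := (List.toFinset_card_of_nodup hn).symm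
    _ ≤ l2.toFinset.card := Finset.card_le_card
        (fun a ha => List.mem_toFinset.2 (h (List.mem_toFinset.1 ha)))
    _ ≤ l2.length := List.toFinset_card_le l2


theorem pvChain_card (d : PySem.Dict Int (PySem.Set Int)) (s : Int)
    (hs : (pvGet d s).Nodup) (k : Nat) {r : Int}
    (hr : pvRch d s r) (hnin : r ∉ pvChain d s k) :
    k + (pvGet d s).length ≤ (pvChain d s k).length := by
  induction k with
  | zero => simp [pvChain]
  | succ k ih =>
    have hnk : r ∉ pvChain d s k := fun hr' =>
      hnin (pvChain_mono d s (Nat.le_succ k) hr')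
    have hih := ih hnk
    obtain ⟨w, hw1, hw2⟩ := pvGrowth d s hr hnk
      (pvChain_mono d s (Nat.zero_le k) : pvChain d s 0 ⊆ pvChain d s k)
    have hnod : (pvChain d s k).Nodup := pvChain_nodup d s hs k
    have hnod1 : (pvChain d s (k + 1)).Nodup := pvChain_nodup d s hs (k + 1)
    have hsub : insert w (pvChain d s k).toFinset ⊆ (pvChain d s (k + 1)).toFinset := by
      intro a ha
      rcases Finset.mem_insert.1 ha with rfl | ha
      · exact List.mem_toFinset.2 hw1
      · exact List.mem_toFinset.2 (pvChain_mono d s (Nat.le_succ k) (List.mem_toFinset.1 ha))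
    have hcard : (pvChain d s k).toFinset.card + 1 ≤ (pvChain d s (k + 1)).toFinset.card := by
      have := Finset.card_le_card hsub
      rwa [Finset.card_insert_of_notMem (fun hw' => hw2 (List.mem_toFinset.1 hw'))] at this
    have e1 := List.toFinset_card_of_nodup hnod
    have e2 := List.toFinset_card_of_nodup hnod1
    omega


-- ---- BFS lemmas ----

theorem pvFoldAdd_append (l acc : List Int) (hd : ∀ x ∈ l, x ∉ acc) (hl : l.Nodup) :
    l.foldl PySem.Set.add acc = acc ++ l := by
  induction l generalizing acc with
  | nil => simp
  | cons a t ih =>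
    have hna : a ∉ acc := hd a (by simp)
    have hadd : PySem.Set.add acc a = acc ++ [a] := by
      unfold PySem.Set.add
      rw [if_neg (by simp [hna])]
    rw [List.foldl_cons, hadd, ih (acc ++ [a])]
    · simp
    · intro x hx
      simp only [List.mem_append, List.mem_singleton]
      rintro (h | rfl)
      · exact hd x (by simp [hx]) h
      · exact (List.nodup_cons.1 hl).1 hx
    · exact (List.nodup_cons.1 hl).2

theorem pvOfList_self (l : List Int) (h : l.Nodup) : PySem.Set.ofList l = l := by
  rw [PySem.Set.ofList_eq_foldl, pvFoldAdd_append l [] (by simp) h]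
  simp

theorem pvUnion_append (s t : PySem.Set Int) (ht : t.Nodup)
    (hd : ∀ x ∈ t, x ∉ s) : s.union t = s ++ t := by
  show PySem.Set.update s t = s ++ t
  rw [PySem.Set.update_eq_append_filter, pvOfList_self t ht]
  congr 1
  apply List.filter_eq_self.2
  intro a ha
  simp [hd a ha]

theorem pvNxtInner_mem (reach : PySem.Set Int) (l acc : List Int) (a : Int) :
    a ∈ l.foldl (fun nxt u => if reach.contains u then nxt else PySem.Set.add nxt u) acc ↔
      a ∈ acc ∨ (a ∈ l ∧ a ∉ reach) := by
  induction l generalizing acc with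
  | nil => simp
  | cons y t ih =>
    rw [List.foldl_cons]
    by_cases hy : y ∈ reach
    · rw [if_pos (by simpa [PySem.Set.contains_iff] using hy), ih]
      constructor
      · rintro (h | ⟨h1, h2⟩)
        · exact Or.inl h
        · exact Or.inr ⟨List.mem_cons_of_mem y h1, h2⟩
      · rintro (h | ⟨h1, h2⟩)
        · exact Or.inl h
        · rcases List.mem_cons.1 h1 with rfl | h1
          · exact absurd hy h2
          · exact Or.inr ⟨h1, h2⟩
    · rw [if_neg (by simpa [PySem.Set.contains_iff] using hy), ih]
      rw [PySem.Set.mem_add]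
      constructor
      · rintro ((h | rfl) | ⟨h1, h2⟩)
        · exact Or.inl h
        · exact Or.inr ⟨by simp, hy⟩
        · exact Or.inr ⟨List.mem_cons_of_mem y h1, h2⟩
      · rintro (h | ⟨h1, h2⟩)
        · exact Or.inl (Or.inl h)
        · rcases List.mem_cons.1 h1 with rfl | h1
          · exact Or.inl (Or.inr rfl)
          · exact Or.inr ⟨h1, h2⟩

theorem pvNxtInner_nodup (reach : PySem.Set Int) (l acc : List Int) (h : acc.Nodup) :
    (l.foldl (fun nxt u => if reach.contains u then nxt else PySem.Set.add nxt u) acc).Nodup := by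
  induction l generalizing acc with
  | nil => simpa using h
  | cons y t ih =>
    rw [List.foldl_cons]
    split
    · exact ih acc h
    · exact ih _ (PySem.Set.nodup_add acc y h)

theorem pvNxt_mem (d : PySem.Dict Int (PySem.Set Int)) (reach : PySem.Set Int)
    (frontier acc : List Int) (a : Int) :
    a ∈ frontier.foldl (fun nxt v =>
        (d.getD v PySem.Set.empty).foldl (fun nxt u =>
          if reach.contains u then nxt else PySem.Set.add nxt u) nxt) acc ↔
      a ∈ acc ∨ ∃ v ∈ frontier, a ∈ pvGet d v ∧ a ∉ reach := by
  induction frontier generalizing acc with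
  | nil => simp
  | cons y t ih =>
    rw [List.foldl_cons, ih, pvNxtInner_mem]
    constructor
    · rintro ((h | ⟨h1, h2⟩) | ⟨v, hv, h1, h2⟩)
      · exact Or.inl h
      · exact Or.inr ⟨y, by simp, h1, h2⟩
      · exact Or.inr ⟨v, List.mem_cons_of_mem y hv, h1, h2⟩
    · rintro (h | ⟨v, hv, h1, h2⟩)
      · exact Or.inl (Or.inl h)
      · rcases List.mem_cons.1 hv with rfl | hv
        · exact Or.inl (Or.inr ⟨h1, h2⟩)
        · exact Or.inr ⟨v, hv, h1, h2⟩

theorem pvNxt_nodup (d : PySem.Dict Int (PySem.Set Int)) (reach : PySem.Set Int)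
    (frontier acc : List Int) (h : acc.Nodup) :
    (frontier.foldl (fun nxt v =>
        (d.getD v PySem.Set.empty).foldl (fun nxt u =>
          if reach.contains u then nxt else PySem.Set.add nxt u) nxt) acc).Nodup := by
  induction frontier generalizing acc with
  | nil => simpa using h
  | cons y t ih =>
    rw [List.foldl_cons]
    exact ih _ (pvNxtInner_nodup reach _ acc h)


theorem pvBfs_spec (d : PySem.Dict Int (PySem.Set Int)) (s : Int) (U : List Int)
    (hU : ∀ v, pvGet d v ⊆ U)
    (fuel : Nat) (reach frontier : PySem.Set Int)
    (hrU : reach ⊆ U)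
    (h1 : reach.Nodup) (h2 : frontier ⊆ reach)
    (h3 : ∀ v ∈ reach, v ∉ frontier → pvGet d v ⊆ reach)
    (h4 : ∀ x ∈ reach, pvRch d s x)
    (h5 : pvGet d s ⊆ reach)
    (hfuel : frontier = [] ∨ U.length + 2 ≤ fuel + reach.length) :
    (pvBfs d fuel reach frontier).Nodup ∧
      ∀ x, x ∈ pvBfs d fuel reach frontier ↔ pvRch d s x := by
  induction fuel generalizing reach frontier with
  | zero =>
    rcases hfuel with rfl | hfuel
    · rw [show pvBfs d 0 reach [] = reach from rfl]
      refine ⟨h1, fun x => ⟨h4 x, fun hr => ?_⟩⟩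
      induction hr with
      | base h => exact h5 h
      | step hv hx ihx => exact h3 _ ihx (by simp) hx
    · exfalso
      have := pvSubLen hrU h1
      omega
  | succ fuel ih =>
    by_cases hfe : frontier = []
    · subst hfe
      rw [show pvBfs d (fuel + 1) reach [] = reach by simp [pvBfs]]
      refine ⟨h1, fun x => ⟨h4 x, fun hr => ?_⟩⟩
      induction hr with
      | base h => exact h5 h
      | step hv hx ihx => exact h3 _ ihx (by simp) hx
    · have hne : (List.isEmpty frontier) = false := by
        simp [hfe]
      rw [show pvBfs d (fuel + 1) reach frontier =
          pvBfs d fuel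
            (reach.union (frontier.foldl (fun nxt v =>
              (d.getD v PySem.Set.empty).foldl (fun nxt u =>
                if reach.contains u then nxt else PySem.Set.add nxt u) nxt) PySem.Set.empty))
            (frontier.foldl (fun nxt v =>
              (d.getD v PySem.Set.empty).foldl (fun nxt u =>
                if reach.contains u then nxt else PySem.Set.add nxt u) nxt) PySem.Set.empty)
          by simp [pvBfs, hne]]
      set nxt := frontier.foldl (fun nxt v =>
        (d.getD v PySem.Set.empty).foldl (fun nxt u =>
          if reach.contains u then nxt else PySem.Set.add nxt u) nxt)
          (PySem.Set.empty : PySem.Set Int) with hnxt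
      have nmem : ∀ a, a ∈ nxt ↔ ∃ v ∈ frontier, a ∈ pvGet d v ∧ a ∉ reach := by
        intro a
        rw [hnxt, pvNxt_mem]
        simp [PySem.Set.empty]
      have nnodup : nxt.Nodup := pvNxt_nodup d reach frontier _ (by simp [PySem.Set.empty])
      have ndisj : ∀ a ∈ nxt, a ∉ reach := fun a ha => ((nmem a).1 ha).choose_spec.2.2
      have hu : reach.union nxt = reach ++ nxt := pvUnion_append reach nxt nnodup ndisj
      rw [hu]
      have hmem_app : ∀ a : Int, a ∈ reach ++ nxt ↔ a ∈ reach ∨ a ∈ nxt := by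
        intro a; simp
      apply ih (reach ++ nxt) nxt
      · intro a ha
        rcases (hmem_app a).1 ha with h | h
        · exact hrU h
        · obtain ⟨v, _, h1', _⟩ := (nmem a).1 h
          exact hU v h1'
      · exact List.Nodup.append h1 nnodup (fun a ha hb => ndisj a hb ha)
      · intro a ha
        exact (hmem_app a).2 (Or.inr ha)
      · intro v hv hvn
        rcases (hmem_app v).1 hv with hvr | hvx
        · by_cases hvf : v ∈ frontier
          · intro u hu'
            by_cases hur : u ∈ reach
            · exact (hmem_app u).2 (Or.inl hur)
            · exact (hmem_app u).2 (Or.inr ((nmem u).2 ⟨v, hvf, hu', hur⟩))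
          · intro u hu'
            exact (hmem_app u).2 (Or.inl (h3 v hvr hvf hu'))
        · exact absurd hvx hvn
      · intro x hx
        rcases (hmem_app x).1 hx with h | h
        · exact h4 x h
        · obtain ⟨v, hvf, hxv, _⟩ := (nmem x).1 h
          exact pvRch.step (h4 v (h2 hvf)) hxv
      · intro x hx
        exact (hmem_app x).2 (Or.inl (h5 hx))
      · by_cases hnx : nxt = []
        · exact Or.inl hnx
        · refine Or.inr ?_
          have hpos : 0 < nxt.length := List.length_pos_iff.2 hnx
          rcases hfuel with rfl | hfuel
          · exact absurd rfl hfe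
          · simp only [List.length_append]
            omega

-- ---- A-side round lemmas ----

theorem pvFoldl_const {α β : Type} (f : α → α) (l : List β) (a : α) :
    l.foldl (fun a _ => f a) a = f^[l.length] a := by
  induction l generalizing a with
  | nil => simp
  | cons y t ih => simp [List.foldl_cons, ih, Function.iterate_succ_apply]


-- the single statement of A's inner loop
def pvRStep (d : PySem.Dict Int (PySem.Set Int)) (star : Int) :
    PySem.Dict Int (PySem.Set Int) :=
  let user := d.getD star PySem.Set.empty
  let add_people := user.foldl (fun acc x =>
    if d.contains x then acc.union (d.getD x PySem.Set.empty) else acc)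
    PySem.Set.empty
  d.insert star (user.union add_people)

theorem pvRound_eq (d : PySem.Dict Int (PySem.Set Int)) :
    pvRound d = d.keys.foldl pvRStep d := rfl

theorem pvGet_nil_of_not_contains (d : PySem.Dict Int (PySem.Set Int)) (k : Int)
    (h : d.contains k = false) : pvGet d k = [] := by
  unfold pvGet
  rw [PySem.Dict.getD_of_not_contains d PySem.Set.empty h]
  rfl

theorem pvGet_nil_of_not_mem_keys (d : PySem.Dict Int (PySem.Set Int)) (k : Int)
    (h : k ∉ d.keys) : pvGet d k = [] := by
  apply pvGet_nil_of_not_contains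
  rw [← Bool.not_eq_true]
  intro hc
  exact h ((PySem.Dict.contains_iff_mem_keys d k).1 hc)

theorem pvChain_nil (d : PySem.Dict Int (PySem.Set Int)) (k : Int)
    (h : pvGet d k = []) : ∀ j, pvChain d k j = []
  | 0 => h
  | j + 1 => by
    have := pvChain_nil d k h j
    show pvT d (pvChain d k j) = []
    rw [this]
    rfl

theorem pvAdd_mem (d : PySem.Dict Int (PySem.Set Int)) (l : List Int)
    (acc : PySem.Set Int) (a : Int) :
    a ∈ l.foldl (fun acc x =>
        if d.contains x then acc.union (d.getD x PySem.Set.empty) else acc) acc ↔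
      a ∈ acc ∨ ∃ y ∈ l, d.contains y = true ∧ a ∈ pvGet d y := by
  induction l generalizing acc with
  | nil => simp
  | cons y t ih =>
    rw [List.foldl_cons]
    by_cases hy : d.contains y = true
    · rw [if_pos hy, ih]
      constructor
      · rintro (h | ⟨z, hz, h1, h2⟩)
        · rcases (PySem.Set.mem_union _ _ a).1 h with h | h
          · exact Or.inl h
          · exact Or.inr ⟨y, by simp, hy, h⟩
        · exact Or.inr ⟨z, List.mem_cons_of_mem y hz, h1, h2⟩
      · rintro (h | ⟨z, hz, h1, h2⟩)
        · exact Or.inl ((PySem.Set.mem_union _ _ a).2 (Or.inl h))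
        · rcases List.mem_cons.1 hz with rfl | hz
          · exact Or.inl ((PySem.Set.mem_union _ _ a).2 (Or.inr h2))
          · exact Or.inr ⟨z, hz, h1, h2⟩
    · rw [if_neg hy, ih]
      constructor
      · rintro (h | ⟨z, hz, h1, h2⟩)
        · exact Or.inl h
        · exact Or.inr ⟨z, List.mem_cons_of_mem y hz, h1, h2⟩
      · rintro (h | ⟨z, hz, h1, h2⟩)
        · exact Or.inl h
        · rcases List.mem_cons.1 hz with rfl | hz
          · exact absurd h1 hy
          · exact Or.inr ⟨z, hz, h1, h2⟩

theorem pvRStep_get (d : PySem.Dict Int (PySem.Set Int)) (star k : Int) :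
    pvGet (pvRStep d star) k =
      if k = star then
        (pvGet d star).union ((pvGet d star).foldl (fun acc x =>
          if d.contains x then acc.union (d.getD x PySem.Set.empty) else acc)
          PySem.Set.empty)
      else pvGet d k := by
  unfold pvRStep pvGet
  rw [PySem.Dict.getD_insert]

theorem pvRStep_keys (d0 d : PySem.Dict Int (PySem.Set Int)) (star : Int)
    (hkeys : d.keys = d0.keys) (hstar : star ∈ d0.keys) :
    (pvRStep d star).keys = d0.keys := by
  unfold pvRStep
  rw [PySem.Dict.keys_insert_of_contains]
  · exact hkeys
  · exact (PySem.Dict.contains_iff_mem_keys d star).2 (hkeys ▸ hstar)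

theorem pvRStep_inv (d0 d : PySem.Dict Int (PySem.Set Int)) (star : Int)
    (h : pvInv d0 d) (hstar : star ∈ d0.keys) :
    pvInv d0 (pvRStep d star) ∧ pvMono d (pvRStep d star) := by
  obtain ⟨hkeys, hvals⟩ := h
  have hmono : pvMono d (pvRStep d star) := by
    intro k a ha
    rw [pvRStep_get]
    split
    · next heq =>
      subst heq
      exact (PySem.Set.mem_union _ _ a).2 (Or.inl ha)
    · exact ha
  refine ⟨⟨pvRStep_keys d0 d star hkeys hstar, fun k => ?_⟩, hmono⟩
  rw [pvRStep_get]
  split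
  · next heq =>
    subst heq
    obtain ⟨hnd, hsub, hrch⟩ := hvals k
    refine ⟨PySem.Set.nodup_union _ _ hnd, fun a ha => (PySem.Set.mem_union _ _ a).2 (Or.inl (hsub ha)), ?_⟩
    intro x hx
    rcases (PySem.Set.mem_union _ _ x).1 hx with hx | hx
    · exact hrch x hx
    · rcases (pvAdd_mem d _ _ x).1 hx with hx' | ⟨y, hy, _, hxy⟩
      · simp [PySem.Set.empty] at hx'
      · exact pvRch_trans d0 (hrch y hy) ((hvals y).2.2 x hxy)
  · exact hvals k

theorem pvRoundFold_inv (d0 : PySem.Dict Int (PySem.Set Int)) (l : List Int)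
    (hl : ∀ k ∈ l, k ∈ d0.keys) :
    ∀ d, pvInv d0 d → pvInv d0 (l.foldl pvRStep d) ∧ pvMono d (l.foldl pvRStep d) := by
  induction l with
  | nil => exact fun d h => ⟨h, fun k a ha => ha⟩
  | cons star t ih =>
    intro d h
    have hstar : star ∈ d0.keys := hl star (by simp)
    obtain ⟨h1, hm1⟩ := pvRStep_inv d0 d star h hstar
    obtain ⟨h2, hm2⟩ := ih (fun k hk => hl k (List.mem_cons_of_mem star hk)) _ h1
    exact ⟨h2, fun k a ha => hm2 k (hm1 k ha)⟩

theorem pvRoundFold_lower (d0 : PySem.Dict Int (PySem.Set Int)) (j : Nat) (l : List Int)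
    (hl : ∀ k ∈ l, k ∈ d0.keys) :
    ∀ d, pvInv d0 d → (∀ k ∈ l, pvChain d0 k j ⊆ pvGet d k) →
      ∀ k ∈ l, pvChain d0 k (j + 1) ⊆ pvGet (l.foldl pvRStep d) k := by
  induction l with
  | nil => simp
  | cons star t ih =>
    intro d h H2 k hk
    obtain ⟨hkeys, hvals⟩ := h
    have hstar : star ∈ d0.keys := hl star (by simp)
    obtain ⟨hinv1, hmono1⟩ := pvRStep_inv d0 d star ⟨hkeys, hvals⟩ hstar
    have hC : pvChain d0 star (j + 1) ⊆ pvGet (pvRStep d star) star := by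
      intro a ha
      rw [pvRStep_get, if_pos rfl]
      rcases (pvT_mem d0 _ a).1 ha with ha' | ⟨x, hx, hax⟩
      · exact (PySem.Set.mem_union _ _ a).2 (Or.inl (H2 star (by simp) ha'))
      · have hx_user : x ∈ pvGet d star := H2 star (by simp) hx
        have hcont0 : d0.contains x = true := by
          cases hcx : d0.contains x with
          | true => rfl
          | false =>
            rw [pvGet_nil_of_not_contains d0 x hcx] at hax
            simp at hax
        have hcont : d.contains x = true := by
          rw [PySem.Dict.contains_iff_mem_keys, hkeys]
          exact (PySem.Dict.contains_iff_mem_keys d0 x).1 hcont0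
        apply (PySem.Set.mem_union _ _ a).2
        refine Or.inr ((pvAdd_mem d _ _ a).2 (Or.inr ⟨x, hx_user, hcont, ?_⟩))
        exact (hvals x).2.1 hax
    rcases List.mem_cons.1 hk with rfl | hk
    · obtain ⟨_, hmono2⟩ := pvRoundFold_inv d0 t
        (fun k' hk' => hl k' (List.mem_cons_of_mem _ hk')) _ hinv1
      exact fun a ha => hmono2 k (hC ha)
    · exact ih (fun k' hk' => hl k' (List.mem_cons_of_mem _ hk')) _ hinv1
        (fun k' hk' a ha => hmono1 k' (H2 k' (List.mem_cons_of_mem _ hk') ha)) k hk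

theorem pvRound_inv (d0 d' : PySem.Dict Int (PySem.Set Int)) (h : pvInv d0 d') :
    pvInv d0 (pvRound d') ∧ pvMono d' (pvRound d') := by
  rw [pvRound_eq]
  exact pvRoundFold_inv d0 d'.keys (fun k hk => h.1 ▸ hk) d' h


theorem pvRound_lower (d0 d' : PySem.Dict Int (PySem.Set Int)) (j : Nat)
    (h : pvInv d0 d') (h2 : ∀ k, pvChain d0 k j ⊆ pvGet d' k) :
    ∀ k, pvChain d0 k (j + 1) ⊆ pvGet (pvRound d') k := by
  intro k
  by_cases hk : k ∈ d0.keys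
  · rw [pvRound_eq]
    exact pvRoundFold_lower d0 j d'.keys (fun k' hk' => h.1 ▸ hk') d' h
      (fun k' _ => h2 k') k (h.1 ▸ hk)
  · rw [pvChain_nil d0 k (pvGet_nil_of_not_mem_keys d0 k hk)]
    exact fun a ha => absurd ha (List.not_mem_nil)


theorem pvRounds_spec (d0 : PySem.Dict Int (PySem.Set Int))
    (hbase : pvInv d0 d0) (n : Nat) :
    pvInv d0 (pvRound^[n] d0) ∧ ∀ k, pvChain d0 k n ⊆ pvGet (pvRound^[n] d0) k := by
  induction n with
  | zero =>
    refine ⟨hbase, fun k => ?_⟩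
    exact fun a ha => ha
  | succ n ih =>
    rw [Function.iterate_succ_apply']
    exact ⟨(pvRound_inv d0 _ ih.1).1, pvRound_lower d0 _ n ih.1 ih.2⟩



-- ---- build lemmas ----


theorem pvPairs_mem (gx : List Int) : ∀ p ∈ pvPairs gx, p.1 ∈ gx ∧ p.2 ∈ gx := by
  match gx with
  | [] => simp [pvPairs]
  | [a] => simp [pvPairs]
  | a :: b :: t =>
    intro p hp
    rcases List.mem_cons.1 hp with rfl | hp
    · simp
    · have := pvPairs_mem t p hp
      exact ⟨by simp [this.1], by simp [this.2]⟩

theorem pvGetD_append_mid (pre t : List Int) (a : Int) :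
    PySem.List.pyGetD (pre ++ a :: t) (pre.length : Int) 0 = a := by
  rw [PySem.List.pyGetD_natCast]
  rw [List.getD_eq_getElem?_getD]
  rw [List.getElem?_append_right (Nat.le_refl pre.length)]
  simp

theorem pvMod_even (n : Nat) (h : n % 2 = 0) : ¬ (PySem.Int.mod (n : Int) 2 ≠ 0) := by
  have : PySem.Int.mod (n : Int) ((2 : Nat) : Int) = ((n % 2 : Nat) : Int) :=
    PySem.Int.mod_natCast n 2
  simp only [Nat.cast_ofNat] at this
  simp only [ne_eq, not_not]
  rw [this, h]
  simp

theorem pvMod_odd (n : Nat) (h : n % 2 = 1) : (PySem.Int.mod ((n : Int)) 2 ≠ 0) := by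
  have : PySem.Int.mod (n : Int) ((2 : Nat) : Int) = ((n % 2 : Nat) : Int) :=
    PySem.Int.mod_natCast n 2
  simp only [Nat.cast_ofNat] at this
  intro heq
  rw [this, h] at heq
  simp at heq

theorem pvBuildA_gen (gx : List Int) :
    ∀ (t pre : List Int) (d : PySem.Dict Int (PySem.Set Int)),
      gx = pre ++ t → pre.length % 2 = 0 →
      (PySem.List.enumerate t (pre.length : Int)).foldl (fun d p =>
        if PySem.Int.mod p.1 2 ≠ 0 then
          d.insert p.2 (((d.getD p.2 PySem.Set.empty).add p.2).add
            (PySem.List.pyGetD gx (p.1 - 1) 0))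
        else d) d = (pvPairs t).foldl pvStep d := by
  intro t
  match t with
  | [] => intro pre d hgx hev; simp [PySem.List.enumerate, pvPairs]
  | [a] =>
    intro pre d hgx hev
    rw [PySem.List.enumerate_cons]
    simp only [List.foldl_cons]
    rw [if_neg (pvMod_even pre.length hev)]
    simp [PySem.List.enumerate, pvPairs]
  | a :: b :: t' =>
    intro pre d hgx hev
    rw [PySem.List.enumerate_cons, PySem.List.enumerate_cons]
    simp only [List.foldl_cons]
    rw [if_neg (pvMod_even pre.length hev)]
    have hodd : (pre.length : Int) + 1 = ((pre.length + 1 : Nat) : Int) := by push_cast; ring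
    rw [hodd, if_pos (pvMod_odd (pre.length + 1) (by omega))]
    have hidx : ((pre.length + 1 : Nat) : Int) - 1 = (pre.length : Int) := by push_cast; ring
    have hga : PySem.List.pyGetD gx ((pre.length : Int)) 0 = a := by
      rw [hgx]; exact pvGetD_append_mid pre (b :: t') a
    rw [hidx, hga]
    show (PySem.List.enumerate t' ((pre.length : Int) + 1 + 1)).foldl _ (pvStep d (a, b)) = _
    have hlen : (pre.length : Int) + 1 + 1 = (((pre ++ [a, b]).length : Nat) : Int) := by
      simp only [List.length_append, List.length_cons, List.length_nil]
      push_cast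
      omega
    rw [hlen]
    have := pvBuildA_gen gx t' (pre ++ [a, b]) (pvStep d (a, b))
      (by simp [hgx]) (by simp; omega)
    rw [this]
    simp [pvPairs]

theorem pvRange_two_cons {a b : Int} (h : a < b) :
    PySem.List.pyRange a b 2 = a :: PySem.List.pyRange (a + 2) b 2 := by
  rw [PySem.List.pyRange_of_pos a b (by norm_num), PySem.List.pyRange_of_pos (a + 2) b (by norm_num)]
  rw [if_pos h]
  have he : b - (a + 2) + 2 - 1 = b - a - 1 := by ring
  have h2 : 0 ≤ (b - (a + 2) + 2 - 1) / 2 := by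
    rw [he]
    apply Int.ediv_nonneg (by omega) (by norm_num)
  have hcnt : ((b - a + 2 - 1) / 2).toNat = ((b - (a + 2) + 2 - 1) / 2).toNat + 1 := by
    have h1 : (b - a + 2 - 1) / 2 = (b - (a + 2) + 2 - 1) / 2 + 1 := by
      rw [show b - a + 2 - 1 = (b - (a + 2) + 2 - 1) + 1 * 2 by ring]
      rw [Int.add_mul_ediv_right _ _ (by norm_num : (2:Int) ≠ 0)]
    omega
  rw [hcnt]
  by_cases hb : a + 2 < b
  · rw [if_pos hb, List.range_succ_eq_map]
    simp only [List.map_cons, List.map_map]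
    congr 1
    · simp
    · apply List.map_congr_left
      intro x hx
      simp only [Function.comp_apply]
      push_cast
      ring
  · rw [if_neg hb]
    have hz : ((b - (a + 2) + 2 - 1) / 2).toNat = 0 := by
      rw [he]
      have h01 : b - a - 1 = 0 ∨ b - a - 1 = 1 := by omega
      rcases h01 with h01 | h01 <;> rw [h01] <;> decide
    rw [hz]
    simp

theorem pvRange_two_nil {a b : Int} (h : b ≤ a) : PySem.List.pyRange a b 2 = [] := by
  rw [PySem.List.pyRange_of_pos a b (by norm_num), if_neg (by omega)]
  simp

theorem pvBuildA_eq (gx_list : List Int) :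
    (PySem.List.enumerate gx_list).foldl (fun d p =>
      if PySem.Int.mod p.1 2 ≠ 0 then
        d.insert p.2 (((d.getD p.2 PySem.Set.empty).add p.2).add
          (PySem.List.pyGetD gx_list (p.1 - 1) 0))
      else d) PySem.Dict.empty = pvD0 gx_list := by
  have := pvBuildA_gen gx_list gx_list [] PySem.Dict.empty rfl rfl
  simpa [pvD0] using this



theorem pvBuildB_gen (gx : List Int) :
    ∀ (t pre : List Int) (d : PySem.Dict Int (PySem.Set Int)),
      gx = pre ++ t → pre.length % 2 = 0 →
      (PySem.List.pyRange ((pre.length : Int) + 1) (gx.length : Int) 2).foldl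
        (fun fo i =>
          let b := PySem.List.pyGetD gx i 0
          let a := PySem.List.pyGetD gx (i - 1) 0
          let fo := if fo.1.contains b then fo else (fo.1.insert b PySem.Set.empty, fo.2 ++ [b])
          (fo.1.insert b (((fo.1.getD b PySem.Set.empty).add b).add a), fo.2)) (d, d.keys)
      = ((pvPairs t).foldl pvStep d, ((pvPairs t).foldl pvStep d).keys) := by
  intro t
  match t with
  | [] =>
    intro pre d hgx hev
    rw [pvRange_two_nil (by rw [hgx]; simp)]
    simp [pvPairs]
  | [a] =>
    intro pre d hgx hev
    rw [pvRange_two_nil (by rw [hgx]; simp)]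
    simp [pvPairs]
  | a :: b :: t' =>
    intro pre d hgx hev
    set F := (fun (fo : PySem.Dict Int (PySem.Set Int) × List Int) (i : Int) =>
      let b := PySem.List.pyGetD gx i 0
      let a := PySem.List.pyGetD gx (i - 1) 0
      let fo := if fo.1.contains b then fo else (fo.1.insert b PySem.Set.empty, fo.2 ++ [b])
      (fo.1.insert b (((fo.1.getD b PySem.Set.empty).add b).add a), fo.2)) with hF
    have hlt : (pre.length : Int) + 1 < (gx.length : Int) := by
      rw [hgx]
      simp only [List.length_append, List.length_cons]
      push_cast
      omega
    rw [pvRange_two_cons hlt, List.foldl_cons]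
    have hb : PySem.List.pyGetD gx ((pre.length : Int) + 1) 0 = b := by
      have h1 : gx = (pre ++ [a]) ++ b :: t' := by simp [hgx]
      have h2 : (pre.length : Int) + 1 = (((pre ++ [a]).length : Nat) : Int) := by
        simp only [List.length_append, List.length_cons, List.length_nil]
        push_cast
        omega
      rw [h2, h1]
      exact pvGetD_append_mid (pre ++ [a]) t' b
    have ha : PySem.List.pyGetD gx ((pre.length : Int) + 1 - 1) 0 = a := by
      rw [show (pre.length : Int) + 1 - 1 = ((pre.length : Nat) : Int) by ring]
      rw [hgx]
      exact pvGetD_append_mid pre (b :: t') a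
    have hstep : F (d, d.keys) ((pre.length : Int) + 1)
        = (pvStep d (a, b), (pvStep d (a, b)).keys) := by
      rw [hF]
      simp only [hb, ha]
      cases hc : d.contains b with
      | true =>
        rw [if_pos rfl]
        have hk : (pvStep d (a, b)).keys = d.keys := by
          unfold pvStep
          exact PySem.Dict.keys_insert_of_contains d _ hc
        rw [hk]
        rfl
      | false =>
        rw [if_neg (by simp)]
        have hget : (d.insert b PySem.Set.empty).getD b PySem.Set.empty = PySem.Set.empty := by
          rw [PySem.Dict.getD_insert]
          simp
        have hget2 : d.getD b PySem.Set.empty = PySem.Set.empty :=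
          PySem.Dict.getD_of_not_contains d _ hc
        have hk : (pvStep d (a, b)).keys = d.keys ++ [b] := by
          unfold pvStep
          exact PySem.Dict.keys_insert_of_not_contains d _ hc
        show ((d.insert b PySem.Set.empty).insert b
            ((((d.insert b PySem.Set.empty).getD b PySem.Set.empty).add b).add a),
            d.keys ++ [b]) = _
        rw [hget, PySem.Dict.insert_insert_self, hk]
        simp [pvStep, pvGet, PySem.Dict.getD_of_not_contains _ _ hc]
    rw [show F (d, d.keys) ((pre.length : Int) + 1)
        = (pvStep d (a, b), (pvStep d (a, b)).keys) from hstep]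
    have hcast : (pre.length : Int) + 1 + 2 = (((pre ++ [a, b]).length : Nat) : Int) + 1 := by
      simp only [List.length_append, List.length_cons, List.length_nil]
      push_cast
      omega
    rw [hcast]
    have := pvBuildB_gen gx t' (pre ++ [a, b]) (pvStep d (a, b))
      (by simp [hgx]) (by simp; omega)
    rw [hF]
    rw [this]
    simp [pvPairs]

theorem pvBuildB_eq (gx_list : List Int) :
    pvBuildB gx_list = (pvD0 gx_list, (pvD0 gx_list).keys) := by
  have := pvBuildB_gen gx_list gx_list [] PySem.Dict.empty rfl rfl
  unfold pvBuildB pvD0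
  simpa using this



theorem pvStep_get (d : PySem.Dict Int (PySem.Set Int)) (p : Int × Int) (k : Int) :
    pvGet (pvStep d p) k =
      if k = p.2 then ((pvGet d p.2).add p.2).add p.1 else pvGet d k := by
  unfold pvStep pvGet
  rw [PySem.Dict.getD_insert]

theorem pvFoldStep_val_nodup (l : List (Int × Int)) :
    ∀ d, (∀ k, (pvGet d k).Nodup) → ∀ k, (pvGet (l.foldl pvStep d) k).Nodup := by
  induction l with
  | nil => exact fun d h => h
  | cons p t ih =>
    intro d h k
    apply ih
    intro k'
    rw [pvStep_get]
    split
    · exact PySem.Set.nodup_add _ _ (PySem.Set.nodup_add _ _ (h p.2))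
    · exact h k'

theorem pvFoldStep_self_mem (l : List (Int × Int)) :
    ∀ d, (∀ k, d.contains k = true → k ∈ pvGet d k) →
      ∀ k, (l.foldl pvStep d).contains k = true → k ∈ pvGet (l.foldl pvStep d) k := by
  induction l with
  | nil => exact fun d h => h
  | cons p t ih =>
    intro d h
    apply ih
    intro k hk
    rw [pvStep_get]
    by_cases hkp : k = p.2
    · rw [if_pos hkp]
      apply (PySem.Set.mem_add _ _ _).2
      exact Or.inl ((PySem.Set.mem_add _ _ _).2 (Or.inr hkp))
    · rw [if_neg hkp]
      apply h
      unfold pvStep at hk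
      rw [PySem.Dict.contains_insert d p.2 k (((pvGet d p.2).add p.2).add p.1)] at hk
      simp only [Bool.or_eq_true, beq_iff_eq] at hk
      rcases hk with hk | hk
      · exact absurd hk hkp
      · exact hk

theorem pvFoldStep_val_sub (l : List (Int × Int)) (S : List Int)
    (hp : ∀ p ∈ l, p.1 ∈ S ∧ p.2 ∈ S) :
    ∀ d, (∀ k, pvGet d k ⊆ S) → ∀ k, pvGet (l.foldl pvStep d) k ⊆ S := by
  induction l with
  | nil => exact fun d h => h
  | cons p t ih =>
    intro d h
    apply ih (fun q hq => hp q (List.mem_cons_of_mem _ hq))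
    intro k a ha
    rw [pvStep_get] at ha
    by_cases hkp : k = p.2
    · rw [if_pos hkp] at ha
      rcases (PySem.Set.mem_add _ _ _).1 ha with ha | rfl
      · rcases (PySem.Set.mem_add _ _ _).1 ha with ha | rfl
        · exact h p.2 ha
        · exact (hp p (by simp)).2
      · exact (hp p (by simp)).1
    · rw [if_neg hkp] at ha
      exact h k ha

theorem pvD0_keys_nodup (gx_list : List Int) : (pvD0 gx_list).keys.Nodup := by
  unfold pvD0
  have : (pvPairs gx_list).foldl pvStep PySem.Dict.empty =
      (pvPairs gx_list).foldl
        (fun d p => d.insert p.2 (((pvGet d p.2).add p.2).add p.1)) PySem.Dict.empty := rfl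
  rw [this]
  exact PySem.Dict.nodup_keys_foldl_insert_key (pvPairs gx_list) Prod.snd
    (fun d p => ((pvGet d p.2).add p.2).add p.1) PySem.Dict.empty (by simp)


theorem pvD0_val_nodup (gx_list : List Int) (k : Int) :
    (pvGet (pvD0 gx_list) k).Nodup := by
  unfold pvD0
  apply pvFoldStep_val_nodup
  intro k'
  unfold pvGet
  simp [PySem.Dict.getD_empty, PySem.Set.empty]


theorem pvD0_self_mem (gx_list : List Int) (k : Int)
    (h : k ∈ (pvD0 gx_list).keys) : k ∈ pvGet (pvD0 gx_list) k := by
  unfold pvD0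
  apply pvFoldStep_self_mem
  · intro k' hk'
    rw [PySem.Dict.contains_empty] at hk'
    exact absurd hk' (by simp)
  · rw [PySem.Dict.contains_iff_mem_keys]
    exact h


theorem pvD0_val_sub (gx_list : List Int) (k : Int) :
    pvGet (pvD0 gx_list) k ⊆ PySem.Set.ofList gx_list := by
  unfold pvD0
  apply pvFoldStep_val_sub
  · intro p hp
    have := pvPairs_mem gx_list p hp
    constructor
    · exact (PySem.Set.mem_ofList _ _).2 this.1
    · exact (PySem.Set.mem_ofList _ _).2 this.2
  · intro k' a ha
    unfold pvGet at ha
    rw [PySem.Dict.getD_empty] at ha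
    simp [PySem.Set.empty] at ha


theorem pvD0_inv (gx_list : List Int) : pvInv (pvD0 gx_list) (pvD0 gx_list) := by
  refine ⟨rfl, fun k => ⟨pvD0_val_nodup gx_list k, fun a ha => ha, fun x hx => pvRch.base hx⟩⟩


-- ---- counting glue ----

theorem pvOfList_len (xs : List Int) : (PySem.Set.ofList xs).length ≤ xs.length := by
  rw [PySem.Set.ofList_eq_foldl]
  have gen : ∀ (l acc : List Int), (l.foldl PySem.Set.add acc).length ≤ acc.length + l.length := by
    intro l
    induction l with
    | nil => simp
    | cons y t ih =>
      intro acc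
      rw [List.foldl_cons]
      have hstep : (PySem.Set.add acc y).length ≤ acc.length + 1 := by
        unfold PySem.Set.add
        split
        · omega
        · simp
      have := ih (PySem.Set.add acc y)
      simp only [List.length_cons]
      omega
  simpa using gen xs []

theorem pvCount_foldl (l : List Int) (P : Int → Prop) [DecidablePred P] :
    ∀ c : Int, l.foldl (fun c x => if P x then c + 1 else c) c
      = c + (l.countP (fun x => decide (P x)) : Int) := by
  induction l with
  | nil => simp
  | cons y t ih =>
    intro c
    rw [List.foldl_cons]
    by_cases h : P y
    · rw [if_pos h, ih, List.countP_cons]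
      simp only [h, decide_true, if_pos]
      push_cast
      ring
    · rw [if_neg h, ih, List.countP_cons]
      simp [h]

-- ---- the pointwise main lemma ----

theorem pvPointwise (num : Int) (gx_list : List Int) (k : Int)
    (hk : k ∈ (pvD0 gx_list).keys) :
    (PySem.Set.len (pvGet (pvRound^[num.toNat] (pvD0 gx_list)) k) = num) ↔
    (PySem.Set.len (pvBfs (pvD0 gx_list) (gx_list.length + 2)
        (pvGet (pvD0 gx_list) k) (pvGet (pvD0 gx_list) k)) = num) := by
  set d0 := pvD0 gx_list with hd0
  set seed := pvGet d0 k with hseed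
  have hks : k ∈ seed := pvD0_self_mem gx_list k hk
  have hseednodup : seed.Nodup := pvD0_val_nodup gx_list k
  have hUsub : ∀ v, pvGet d0 v ⊆ PySem.Set.ofList gx_list := fun v => pvD0_val_sub gx_list v
  have hUlen : (PySem.Set.ofList gx_list).length ≤ gx_list.length := pvOfList_len gx_list
  obtain ⟨Rnodup, Rmem⟩ := pvBfs_spec d0 k (PySem.Set.ofList gx_list) hUsub
    (gx_list.length + 2) seed seed (hUsub k) hseednodup (fun a ha => ha)
    (fun v hv hnv => absurd hv hnv) (fun x hx => pvRch.base hx) (fun a ha => ha)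
    (Or.inr (by omega))
  set R := pvBfs d0 (gx_list.length + 2) seed seed with hR
  obtain ⟨hinv, hlow⟩ := pvRounds_spec d0 (pvD0_inv gx_list) num.toNat
  set X := pvGet (pvRound^[num.toNat] d0) k with hX
  have Xnodup : X.Nodup := (hinv.2 k).1
  have XsubR : X ⊆ R := fun x hx => (Rmem x).2 ((hinv.2 k).2.2 x hx)
  have chainX : pvChain d0 k num.toNat ⊆ X := hlow k
  have chainR : pvChain d0 k num.toNat ⊆ R := fun a ha => (Rmem a).2 (pvChain_rch d0 k _ a ha)
  by_cases hn : 0 ≤ num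
  · by_cases hcov : ∀ r ∈ R, r ∈ pvChain d0 k num.toNat
    · have sub2 : R ⊆ X := fun r hr => chainX (hcov r hr)
      have hlen : X.length = R.length :=
        Nat.le_antisymm (pvSubLen XsubR Xnodup) (pvSubLen sub2 Rnodup)
      unfold PySem.Set.len
      rw [hlen]
    · rw [not_forall] at hcov
      obtain ⟨r, hrcov⟩ := hcov
      rw [Classical.not_imp] at hrcov
      obtain ⟨hrR, hrc⟩ := hrcov
      have hrch : pvRch d0 k r := (Rmem r).1 hrR
      have hcard := pvChain_card d0 k hseednodup num.toNat hrch hrc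
      rw [← hseed] at hcard
      have hseedpos : 1 ≤ seed.length := by
        cases hse : seed with
        | nil => rw [hse] at hks; simp at hks
        | cons a t => simp
      have hchainnodup := pvChain_nodup d0 k hseednodup num.toNat
      have hXlen : (pvChain d0 k num.toNat).length ≤ X.length := pvSubLen chainX hchainnodup
      have hRlen : (pvChain d0 k num.toNat).length + 1 ≤ R.length := by
        have hsub : insert r (pvChain d0 k num.toNat).toFinset ⊆ R.toFinset := by
          intro a ha
          rcases Finset.mem_insert.1 ha with rfl | ha
          · exact List.mem_toFinset.2 hrR
          · exact List.mem_toFinset.2 (chainR (List.mem_toFinset.1 ha))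
        have := Finset.card_le_card hsub
        rw [Finset.card_insert_of_notMem (fun hw => hrc (List.mem_toFinset.1 hw)),
          List.toFinset_card_of_nodup hchainnodup] at this
        calc (pvChain d0 k num.toNat).length + 1 ≤ R.toFinset.card := this
          _ ≤ R.length := List.toFinset_card_le R
      have hnum : ((num.toNat : Nat) : Int) = num := Int.toNat_of_nonneg hn
      constructor
      · intro h
        exfalso
        unfold PySem.Set.len at h
        omega
      · intro h
        exfalso
        unfold PySem.Set.len at h
        omega
  · constructor
    · intro h
      exfalso
      unfold PySem.Set.len at h
      omega
    · intro h
      exfalso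
      unfold PySem.Set.len at h
      omega



theorem pvRangeLen (num : Int) : (PySem.List.pyRange 0 num).length = num.toNat := by
  rw [PySem.List.pyRange_of_pos 0 num (by norm_num)]
  by_cases h : (0 : Int) < num
  · rw [if_pos h]
    simp only [List.length_map, List.length_range]
    have : num - 0 + 1 - 1 = num := by ring
    rw [this, Int.ediv_one]
  · rw [if_neg h]
    simp
    omega

theorem pvACount (num : Int) (gx_list : List Int) :
    famousPlayer num gx_list =
      (((pvD0 gx_list).keys.countP (fun k =>
        decide (PySem.Set.len (pvGet (pvRound^[num.toNat] (pvD0 gx_list)) k) = num))) : Int) := by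
  unfold famousPlayer
  rw [pvBuildA_eq]
  show (List.foldl (fun star_num p => if PySem.Set.len p.2 = num then star_num + 1 else star_num)
      0 ((PySem.List.pyRange 0 num).foldl (fun d (_ : Int) => pvRound d) (pvD0 gx_list)).items) = _
  rw [pvFoldl_const pvRound (PySem.List.pyRange 0 num) (pvD0 gx_list), pvRangeLen]
  have hkeys : (pvRound^[num.toNat] (pvD0 gx_list)).keys = (pvD0 gx_list).keys :=
    (pvRounds_spec (pvD0 gx_list) (pvD0_inv gx_list) num.toNat).1.1
  have hnd : (pvRound^[num.toNat] (pvD0 gx_list)).keys.Nodup := by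
    rw [hkeys]; exact pvD0_keys_nodup gx_list
  rw [PySem.Dict.items_eq_map_keys _ hnd PySem.Set.empty, hkeys]
  rw [List.foldl_map]
  exact (pvCount_foldl (pvD0 gx_list).keys
    (fun k => PySem.Set.len (pvGet (pvRound^[num.toNat] (pvD0 gx_list)) k) = num) 0).trans
    (by simp)

theorem pvBCount (num : Int) (gx_list : List Int) :
    famousPlayer_alt num gx_list =
      (((pvD0 gx_list).keys.countP (fun k =>
        decide (PySem.Set.len (pvBfs (pvD0 gx_list) (gx_list.length + 2)
          (pvGet (pvD0 gx_list) k) (pvGet (pvD0 gx_list) k)) = num))) : Int) := by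
  unfold famousPlayer_alt
  rw [pvBuildB_eq]
  exact (pvCount_foldl (pvD0 gx_list).keys
    (fun k => PySem.Set.len (pvBfs (pvD0 gx_list) (gx_list.length + 2)
      (pvGet (pvD0 gx_list) k) (pvGet (pvD0 gx_list) k)) = num) 0).trans
    (by simp)

-- ===== VERDICT (by name: the statement is the Claim_ definition above) =====
theorem famousPlayer_spec : Claim_equal_famousPlayer := by
  intro num gx_list _
  unfold Spec_famousPlayer
  rw [pvACount, pvBCount]
  congr 1
  apply List.countP_congr
  intro k hkk
  simp only [decide_eq_true_eq]
  exact pvPointwise num gx_list k hkk
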